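-- pv_equiv track=rewrite | github.com/nguyenxuandat20091985-rgb/Tool-Moi-2026- | app.py | gap_analysis
-- ===== SOURCE A (Python) =====
-- from typing import List, Dict, Tuple, Any
--
-- def gap_analysis(nums: List[str]) -> Dict[str, int]:
--     """Thuật toán 3: Khoảng nghỉ hiện tại"""
--     gaps = {}
--     for num in map(str, range(10)):
--         positions = [i for i, x in enumerate(nums) if x == num]
--         if positions:
--             gaps[num] = len(nums) - 1 - positions[-1]
--         else:
--             gaps[num] = len(nums)
--     return gaps
-- ===== SOURCE B (Python) =====
-- def gap_analysis(nums):
--     """Thuật toán 3: Khoảng nghỉ hiện tại (single pass)"""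
--     n = len(nums)
--     last = {}
--     for i, x in enumerate(nums):
--         last[x] = i
--     return {d: n if d not in last else n - 1 - last[d] for d in "0123456789"}
-- ===== Notes on version B (the rewrite author's own statement) =====
-- stated objective: faster
-- what changed: B replaces A's ten full scans (one list comprehension over enumerate(nums) per digit) with a single pass that records the last index of every element in a dict, then reads the ten digit gaps from that dict.
import Mathlib
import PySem

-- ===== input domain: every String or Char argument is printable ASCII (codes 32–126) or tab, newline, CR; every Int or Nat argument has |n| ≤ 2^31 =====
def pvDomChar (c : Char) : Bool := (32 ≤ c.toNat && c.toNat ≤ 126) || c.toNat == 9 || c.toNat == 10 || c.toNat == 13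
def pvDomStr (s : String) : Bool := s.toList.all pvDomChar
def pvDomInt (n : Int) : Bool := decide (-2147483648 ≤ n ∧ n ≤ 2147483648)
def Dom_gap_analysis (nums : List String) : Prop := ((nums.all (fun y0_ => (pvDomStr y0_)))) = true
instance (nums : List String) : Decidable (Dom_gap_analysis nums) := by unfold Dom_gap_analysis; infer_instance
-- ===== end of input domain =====

-- B makes one pass recording each element's last index instead of A's ten scans per-digit; return values proved equal.

-- ===== PORT A =====
-- for num in map(str, range(10)): positions = [i for i,x in enumerate(nums) if x == num]; gap from positions[-1]
def gap_analysis (nums : List String) : List (String × Int) :=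
  (((PySem.List.pyRange 0 10 1).map PySem.Int.toStr).foldl (fun gaps num =>
      let positions : List Int :=
        ((PySem.List.enumerate nums 0).filter (fun p => p.2 == num)).map (fun p => p.1)
      if positions ≠ [] then
        gaps.insert num ((nums.length : Int) - 1 - PySem.List.pyGetD positions (-1) 0)
      else
        gaps.insert num (nums.length : Int))
    (PySem.Dict.empty : PySem.Dict String Int)).items

-- ===== PORT B =====
-- n = len(nums); last = {}; for i, x in enumerate(nums): last[x] = i; then one dict comprehension over "0123456789"
def gap_analysis_alt (nums : List String) : List (String × Int) :=
  let n : Int := (nums.length : Int)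
  let last : PySem.Dict String Int :=
    (PySem.List.enumerate nums 0).foldl (fun d p => d.insert p.2 p.1)
      (PySem.Dict.empty : PySem.Dict String Int)
  ("0123456789".toList.map (fun c => String.ofList [c])).map (fun d =>
    (d, if !last.contains d then n else n - 1 - last.getD d 0))

-- ===== PRECONDITION & SPEC =====
def Spec_gap_analysis (nums : List String) (out : List (String × Int)) : Prop := out = gap_analysis_alt nums
instance (nums : List String) (out : List (String × Int)) : Decidable (Spec_gap_analysis nums out) := by unfold Spec_gap_analysis; infer_instance

-- ===== CLAIM (what is proved, stated in full; the proofs are below) =====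
def Claim_equal_gap_analysis : Prop := ∀ (nums : List String), Dom_gap_analysis nums → Spec_gap_analysis nums (gap_analysis nums)

-- ===== LEMMAS AND PROOFS =====

-- the keep-last fold returns the last matching element (or the initial accumulator)
theorem foldl_keep_last (l : List (Int × String)) (num : String) (o : Option Int) :
    l.foldl (fun acc p => if p.2 = num then some p.1 else acc) o
      = (((l.filter (fun p => p.2 == num)).getLast?).map (fun p => p.1)).or o := by
  induction l generalizing o with
  | nil => rfl
  | cons p rest ih =>
    simp only [List.foldl_cons, List.filter_cons]
    by_cases h : p.2 = num
    · simp only [h, beq_self_eq_true, if_pos, ih]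
      cases hr : (rest.filter (fun p => p.2 == num)).getLast? with
      | none =>
        have : rest.filter (fun p => p.2 == num) = [] := List.getLast?_eq_none_iff.mp hr
        simp [List.getLast?_cons, this]
      | some q =>
        have hne : rest.filter (fun p => p.2 == num) ≠ [] := by
          intro he; rw [he] at hr; simp at hr
        simp [List.getLast?_cons, hr]
    · simp only [if_neg h, ih]
      have : (p.2 == num) = false := by simpa using h
      simp [this]

-- dict lookup after the last-index fold is the keep-last fold of the indices
theorem get?_foldl_insert_enum (l : List (Int × String)) (d : PySem.Dict String Int) (num : String) :
    (l.foldl (fun d p => d.insert p.2 p.1) d).get? num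
      = l.foldl (fun acc p => if p.2 = num then some p.1 else acc) (d.get? num) := by
  induction l generalizing d with
  | nil => rfl
  | cons p rest ih =>
    simp only [List.foldl_cons, ih, PySem.Dict.get?_insert]
    congr 1
    by_cases h : num = p.2
    · simp [h]
    · have h' : ¬ p.2 = num := fun he => h he.symm
      simp [h, h']

-- the per-digit values of the two ports agree
theorem value_eq (nums : List String) (num : String) :
    (if (((PySem.List.enumerate nums 0).filter (fun p => p.2 == num)).map (fun p => p.1)) ≠ [] then
       (nums.length : Int) - 1 -
         PySem.List.pyGetD (((PySem.List.enumerate nums 0).filter (fun p => p.2 == num)).map (fun p => p.1)) (-1) 0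
     else (nums.length : Int))
    = (let last := (PySem.List.enumerate nums 0).foldl (fun d p => d.insert p.2 p.1)
         (PySem.Dict.empty : PySem.Dict String Int)
       if !last.contains num then (nums.length : Int)
       else (nums.length : Int) - 1 - last.getD num 0) := by
  have hget : ((PySem.List.enumerate nums 0).foldl (fun d p => d.insert p.2 p.1)
      (PySem.Dict.empty : PySem.Dict String Int)).get? num
      = (((PySem.List.enumerate nums 0).filter (fun p => p.2 == num)).getLast?).map (fun p => p.1) := by
    rw [get?_foldl_insert_enum, PySem.Dict.get?_empty, foldl_keep_last]
    cases ((PySem.List.enumerate nums 0).filter (fun p => p.2 == num)).getLast? <;> rfl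
  cases hF : ((PySem.List.enumerate nums 0).filter (fun p => p.2 == num)).getLast? with
  | none =>
    have hnil : (PySem.List.enumerate nums 0).filter (fun p => p.2 == num) = [] :=
      List.getLast?_eq_none_iff.mp hF
    have hc : ((PySem.List.enumerate nums 0).foldl (fun d p => d.insert p.2 p.1)
        (PySem.Dict.empty : PySem.Dict String Int)).contains num = false := by
      rw [PySem.Dict.contains_eq_isSome_get?, hget, hF]; rfl
    simp [hnil, hc]
  | some q =>
    have hne : (PySem.List.enumerate nums 0).filter (fun p => p.2 == num) ≠ [] := by
      intro he; rw [he] at hF; simp at hF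
    have hpne : (((PySem.List.enumerate nums 0).filter (fun p => p.2 == num)).map (fun p => p.1)) ≠ [] := by
      simpa using hne
    have hlast : (((PySem.List.enumerate nums 0).filter (fun p => p.2 == num)).map (fun p => p.1)).getLast hpne = q.1 := by
      have h1 : (((PySem.List.enumerate nums 0).filter (fun p => p.2 == num)).map (fun p => p.1)).getLast? = some q.1 := by
        rw [List.getLast?_map, hF]; rfl
      have h2 := List.getLast?_eq_some_getLast (l := (((PySem.List.enumerate nums 0).filter (fun p => p.2 == num)).map (fun p => p.1))) hpne
      rw [h2] at h1; exact Option.some.inj h1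
    have hc : ((PySem.List.enumerate nums 0).foldl (fun d p => d.insert p.2 p.1)
        (PySem.Dict.empty : PySem.Dict String Int)).contains num = true := by
      rw [PySem.Dict.contains_eq_isSome_get?, hget, hF]; rfl
    have hgd : ((PySem.List.enumerate nums 0).foldl (fun d p => d.insert p.2 p.1)
        (PySem.Dict.empty : PySem.Dict String Int)).getD num 0 = q.1 := by
      rw [PySem.Dict.getD_eq_get?_getD, hget, hF]; rfl
    rw [if_pos hpne, PySem.List.pyGetD_neg_one _ _ hpne, hlast]
    simp [hc, hgd]

-- ===== VERDICT (by name: the statement is the Claim_ definition above) =====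
theorem gap_analysis_spec : Claim_equal_gap_analysis := by
  intro nums _
  show gap_analysis nums = gap_analysis_alt nums
  unfold gap_analysis gap_analysis_alt
  have hbody : (fun (gaps : PySem.Dict String Int) (num : String) =>
      let positions : List Int :=
        ((PySem.List.enumerate nums 0).filter (fun p => p.2 == num)).map (fun p => p.1)
      if positions ≠ [] then
        gaps.insert num ((nums.length : Int) - 1 - PySem.List.pyGetD positions (-1) 0)
      else
        gaps.insert num (nums.length : Int))
      = (fun gaps num => gaps.insert num
          (if (((PySem.List.enumerate nums 0).filter (fun p => p.2 == num)).map (fun p => p.1)) ≠ [] then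
             (nums.length : Int) - 1 -
               PySem.List.pyGetD (((PySem.List.enumerate nums 0).filter (fun p => p.2 == num)).map (fun p => p.1)) (-1) 0
           else (nums.length : Int))) := by
    funext gaps num; by_cases h : (((PySem.List.enumerate nums 0).filter (fun p => p.2 == num)).map (fun p => p.1)) ≠ [] <;> simp [h]
  rw [hbody]
  rw [PySem.Dict.items_foldl_insert_fresh ((PySem.List.pyRange 0 10 1).map PySem.Int.toStr)
      (fun s => s)
      (fun num => if (((PySem.List.enumerate nums 0).filter (fun p => p.2 == num)).map (fun p => p.1)) ≠ [] then
             (nums.length : Int) - 1 -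
               PySem.List.pyGetD (((PySem.List.enumerate nums 0).filter (fun p => p.2 == num)).map (fun p => p.1)) (-1) 0
           else (nums.length : Int))
      PySem.Dict.empty
      (by intro a _; exact PySem.Dict.contains_empty a) (by decide)]
  have hdig : ((PySem.List.pyRange 0 10 1).map PySem.Int.toStr)
      = ("0123456789".toList.map (fun c => String.ofList [c])) := by decide
  rw [hdig]
  show List.map _ _ = _
  apply List.map_congr_left
  intro num _
  simp only [value_eq]
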